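-- pv_equiv track=rewrite | github.com/jIab-b/eval_test | ir/ir.py | _concat_c_string_literals
-- ===== SOURCE A (Python) =====
-- def _decode_c_escapes(s: str) -> str:
--     out: list[str] = []
--     i = 0
--     while i < len(s):
--         ch = s[i]
--         if ch != "\\":
--             out.append(ch)
--             i += 1
--             continue
--         i += 1
--         if i >= len(s):
--             out.append("\\")
--             break
--         esc = s[i]
--         i += 1
--         if esc == "n":
--             out.append("\n")
--         elif esc == "t":
--             out.append("\t")
--         elif esc == "r":
--             out.append("\r")
--         elif esc == "0":
--             out.append("\0")
--         elif esc in ('\\', '"', "'"):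
--             out.append(esc)
--         elif esc == "x":
--             hx = []
--             while i < len(s) and len(hx) < 2 and s[i] in "0123456789abcdefABCDEF":
--                 hx.append(s[i])
--                 i += 1
--             out.append(chr(int("".join(hx or ["0"]), 16)))
--         else:
--             out.append(esc)
--     return "".join(out)
--
-- def _concat_c_string_literals(expr: str) -> str:
--     # Best-effort: concatenate all normal C/C++ string literals found in the expression.
--     out: list[str] = []
--     i = 0
--     while i < len(expr):
--         if expr[i] != '"':
--             i += 1
--             continue
--         i += 1
--         buf: list[str] = []
--         while i < len(expr):
--             ch = expr[i]
--             if ch == "\\" and i + 1 < len(expr):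
--                 buf.append(expr[i])
--                 buf.append(expr[i + 1])
--                 i += 2
--                 continue
--             if ch == '"':
--                 i += 1
--                 break
--             buf.append(ch)
--             i += 1
--         out.append(_decode_c_escapes("".join(buf)))
--     return "".join(out)
-- ===== SOURCE B (Python) =====
-- def _concat_c_string_literals(expr: str) -> str:
--     # Single-pass state machine: decode escapes inline while scanning, no intermediate buffers.
--     out: list[str] = []
--     i = 0
--     n = len(expr)
--     in_string = False
--     while i < n:
--         ch = expr[i]
--         if not in_string:
--             if ch == '"':
--                 in_string = True
--             i += 1
--             continue
--         if ch == '"':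
--             in_string = False
--             i += 1
--             continue
--         if ch != '\\':
--             out.append(ch)
--             i += 1
--             continue
--         i += 1
--         if i >= n:
--             out.append('\\')
--             break
--         esc = expr[i]
--         i += 1
--         if esc == 'n':
--             out.append('\n')
--         elif esc == 't':
--             out.append('\t')
--         elif esc == 'r':
--             out.append('\r')
--         elif esc == '0':
--             out.append('\0')
--         elif esc == 'x':
--             val = 0
--             k = 0
--             while i < n and k < 2 and expr[i] in '0123456789abcdefABCDEF':
--                 val = val * 16 + int(expr[i], 16)
--                 i += 1
--                 k += 1
--             out.append(chr(val))
--         else: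
--             out.append(esc)
--     return ''.join(out)
-- ===== Notes on version B (the rewrite author's own statement) =====
-- stated objective: simpler
-- what changed: A extracts each string literal into a buffer and then runs a separate escape-decoding pass over it; B is a single-pass state machine over expr that tracks an in_string flag and decodes escapes inline, with no intermediate buffer or second pass.
import Mathlib
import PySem

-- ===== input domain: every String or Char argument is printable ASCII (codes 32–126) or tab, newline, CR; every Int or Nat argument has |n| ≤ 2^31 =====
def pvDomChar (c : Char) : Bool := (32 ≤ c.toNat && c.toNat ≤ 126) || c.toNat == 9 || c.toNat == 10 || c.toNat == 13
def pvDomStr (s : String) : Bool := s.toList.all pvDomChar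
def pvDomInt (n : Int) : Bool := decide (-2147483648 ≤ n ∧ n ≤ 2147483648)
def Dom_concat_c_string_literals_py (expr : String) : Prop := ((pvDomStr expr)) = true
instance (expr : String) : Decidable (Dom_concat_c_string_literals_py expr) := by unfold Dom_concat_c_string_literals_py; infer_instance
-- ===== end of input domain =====

-- B fuses A's extract-then-decode pair into one single-pass state machine (objective: simpler, one pass, no intermediate buffer).

-- ===== PORT A =====
-- shared ASCII-hex helpers (used verbatim by both ports, like Python's shared "0123456789abcdefABCDEF" test)
def pvIsHex (c : Char) : Bool := c ∈ "0123456789abcdefABCDEF".toList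

def pvHexVal (c : Char) : Nat :=
  if '0' ≤ c ∧ c ≤ '9' then c.toNat - '0'.toNat
  else if 'a' ≤ c ∧ c ≤ 'f' then c.toNat - 'a'.toNat + 10
  else c.toNat - 'A'.toNat + 10

-- _decode_c_escapes: the while loop over s, step for step (inner ≤2-digit hex loop unrolled)
def pvDecodeA : List Char → List Char
  | [] => []
  | c :: rest =>
    if c ≠ '\\' then c :: pvDecodeA rest
    else match rest with
      | [] => ['\\']
      | e :: rest2 =>
        if e = 'n' then '\n' :: pvDecodeA rest2
        else if e = 't' then '\t' :: pvDecodeA rest2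
        else if e = 'r' then '\r' :: pvDecodeA rest2
        else if e = '0' then Char.ofNat 0 :: pvDecodeA rest2
        else if e = '\\' ∨ e = '"' ∨ e = '\'' then e :: pvDecodeA rest2
        else if e = 'x' then
          match rest2 with
          | [] => Char.ofNat 0 :: pvDecodeA []
          | d1 :: rest3 =>
            if pvIsHex d1 then
              match rest3 with
              | [] => Char.ofNat (pvHexVal d1) :: pvDecodeA []
              | d2 :: rest4 =>
                if pvIsHex d2 then Char.ofNat (16 * pvHexVal d1 + pvHexVal d2) :: pvDecodeA rest4
                else Char.ofNat (pvHexVal d1) :: pvDecodeA (d2 :: rest4)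
            else Char.ofNat 0 :: pvDecodeA (d1 :: rest3)
        else e :: pvDecodeA rest2
termination_by l => l.length
decreasing_by all_goals simp <;> omega

-- inner while of _concat_c_string_literals: collect buf until unescaped '"'; returns (buf, remainder)
def pvTakeLit : List Char → List Char × List Char
  | [] => ([], [])
  | '\\' :: e :: rest => ('\\' :: e :: (pvTakeLit rest).1, (pvTakeLit rest).2)
  | c :: rest =>
    if c = '"' then ([], rest)
    else (c :: (pvTakeLit rest).1, (pvTakeLit rest).2)

-- length lemma cited by pvScanA's decreasing_by
theorem pvTakeLit_snd_length : ∀ l : List Char, (pvTakeLit l).2.length ≤ l.length := by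
  intro l
  fun_induction pvTakeLit l <;> simp_all <;> omega

-- outer while of _concat_c_string_literals
def pvScanA : List Char → List Char
  | [] => []
  | c :: rest =>
    if c ≠ '"' then pvScanA rest
    else pvDecodeA (pvTakeLit rest).1 ++ pvScanA (pvTakeLit rest).2
termination_by l => l.length
decreasing_by
  · simp
  · have := pvTakeLit_snd_length rest
    simp
    omega

def concat_c_string_literals_py (expr : String) : String :=
  String.ofList (pvScanA expr.toList)

-- ===== PORT B =====
-- Source B's single while loop; the in_string flag is the Bool argument
def pvFusedB : Bool → List Char → List Char
  | _, [] => []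
  | false, c :: rest =>
    if c = '"' then pvFusedB true rest else pvFusedB false rest
  | true, c :: rest =>
    if c = '"' then pvFusedB false rest
    else if c ≠ '\\' then c :: pvFusedB true rest
    else match rest with
      | [] => ['\\']
      | e :: rest2 =>
        if e = 'n' then '\n' :: pvFusedB true rest2
        else if e = 't' then '\t' :: pvFusedB true rest2
        else if e = 'r' then '\r' :: pvFusedB true rest2
        else if e = '0' then Char.ofNat 0 :: pvFusedB true rest2
        else if e = 'x' then
          match rest2 with
          | [] => Char.ofNat 0 :: pvFusedB true []
          | d1 :: rest3 =>
            if pvIsHex d1 then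
              match rest3 with
              | [] => Char.ofNat (pvHexVal d1) :: pvFusedB true []
              | d2 :: rest4 =>
                if pvIsHex d2 then Char.ofNat (16 * pvHexVal d1 + pvHexVal d2) :: pvFusedB true rest4
                else Char.ofNat (pvHexVal d1) :: pvFusedB true (d2 :: rest4)
            else Char.ofNat 0 :: pvFusedB true (d1 :: rest3)
        else e :: pvFusedB true rest2
termination_by _ l => l.length
decreasing_by all_goals simp <;> omega

def concat_c_string_literals_py_alt (expr : String) : String :=
  String.ofList (pvFusedB false expr.toList)

-- ===== PRECONDITION & SPEC =====
def Spec_concat_c_string_literals_py (expr : String) (out : String) : Prop := out = concat_c_string_literals_py_alt expr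
instance (expr : String) (out : String) : Decidable (Spec_concat_c_string_literals_py expr out) := by unfold Spec_concat_c_string_literals_py; infer_instance

-- ===== CLAIM (what is proved, stated in full; the proofs are below) =====
def Claim_equal_concat_c_string_literals_py : Prop := ∀ (expr : String), Dom_concat_c_string_literals_py expr → Spec_concat_c_string_literals_py expr (concat_c_string_literals_py expr)

-- ===== LEMMAS AND PROOFS =====

-- unfolding lemmas for pvTakeLit
theorem pvTakeLit_quote (rest : List Char) : pvTakeLit ('"' :: rest) = ([], rest) := by
  simp [pvTakeLit]

theorem pvTakeLit_esc (e : Char) (rest : List Char) :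
    pvTakeLit ('\\' :: e :: rest) = ('\\' :: e :: (pvTakeLit rest).1, (pvTakeLit rest).2) := by
  simp [pvTakeLit]

theorem pvTakeLit_other (c : Char) (rest : List Char) (h1 : c ≠ '"') (h2 : c ≠ '\\') :
    pvTakeLit (c :: rest) = (c :: (pvTakeLit rest).1, (pvTakeLit rest).2) := by
  cases rest <;> simp [pvTakeLit, h1, h2]

theorem pvTakeLit_head (d : Char) (rest : List Char) (h : d ≠ '"') :
    ∃ t, (pvTakeLit (d :: rest)).1 = d :: t := by
  by_cases h2 : d = '\\'
  · subst h2
    cases rest with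
    | nil => exact ⟨[], by simp [pvTakeLit]⟩
    | cons e r => exact ⟨e :: (pvTakeLit r).1, by simp [pvTakeLit_esc]⟩
  · exact ⟨(pvTakeLit rest).1, by simp [pvTakeLit_other d rest h h2]⟩

-- step lemmas for pvFusedB
theorem pvF_nil (b : Bool) : pvFusedB b [] = [] := by cases b <;> rw [pvFusedB.eq_def]

theorem pvF_false (c : Char) (r : List Char) :
    pvFusedB false (c :: r) = if c = '"' then pvFusedB true r else pvFusedB false r := by
  rw [pvFusedB.eq_def]

theorem pvF_quote (r : List Char) : pvFusedB true ('"' :: r) = pvFusedB false r := by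
  rw [pvFusedB.eq_def]; simp

theorem pvF_plain (c : Char) (r : List Char) (h1 : c ≠ '"') (h2 : c ≠ '\\') :
    pvFusedB true (c :: r) = c :: pvFusedB true r := by
  rw [pvFusedB.eq_def]; simp [h1, h2]

theorem pvF_bs_nil : pvFusedB true ['\\'] = ['\\'] := by rw [pvFusedB.eq_def]; simp

theorem pvF_n (r : List Char) : pvFusedB true ('\\' :: 'n' :: r) = '\n' :: pvFusedB true r := by
  rw [pvFusedB.eq_def]; simp
theorem pvF_t (r : List Char) : pvFusedB true ('\\' :: 't' :: r) = '\t' :: pvFusedB true r := by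
  rw [pvFusedB.eq_def]; simp
theorem pvF_r (r : List Char) : pvFusedB true ('\\' :: 'r' :: r) = '\r' :: pvFusedB true r := by
  rw [pvFusedB.eq_def]; simp
theorem pvF_0 (r : List Char) : pvFusedB true ('\\' :: '0' :: r) = Char.ofNat 0 :: pvFusedB true r := by
  rw [pvFusedB.eq_def]; simp

theorem pvF_other (e : Char) (r : List Char) (h1 : e ≠ 'n') (h2 : e ≠ 't') (h3 : e ≠ 'r')
    (h4 : e ≠ '0') (h5 : e ≠ 'x') :
    pvFusedB true ('\\' :: e :: r) = e :: pvFusedB true r := by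
  rw [pvFusedB.eq_def]; simp [h1, h2, h3, h4, h5]

theorem pvF_x_nil : pvFusedB true ['\\', 'x'] = [Char.ofNat 0] := by
  rw [pvFusedB.eq_def]; simp [pvF_nil]

theorem pvF_x0 (d1 : Char) (r : List Char) (h : ¬ pvIsHex d1) :
    pvFusedB true ('\\' :: 'x' :: d1 :: r) = Char.ofNat 0 :: pvFusedB true (d1 :: r) := by
  rw [pvFusedB.eq_def]; simp [h]

theorem pvF_x1_nil (d1 : Char) (h : pvIsHex d1) :
    pvFusedB true ['\\', 'x', d1] = [Char.ofNat (pvHexVal d1)] := by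
  rw [pvFusedB.eq_def]; simp [h, pvF_nil]

theorem pvF_x1 (d1 d2 : Char) (r : List Char) (h1 : pvIsHex d1) (h2 : ¬ pvIsHex d2) :
    pvFusedB true ('\\' :: 'x' :: d1 :: d2 :: r) = Char.ofNat (pvHexVal d1) :: pvFusedB true (d2 :: r) := by
  rw [pvFusedB.eq_def]; simp [h1, h2]

theorem pvF_x2 (d1 d2 : Char) (r : List Char) (h1 : pvIsHex d1) (h2 : pvIsHex d2) :
    pvFusedB true ('\\' :: 'x' :: d1 :: d2 :: r) =
      Char.ofNat (16 * pvHexVal d1 + pvHexVal d2) :: pvFusedB true r := by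
  rw [pvFusedB.eq_def]; simp [h1, h2]

-- step lemmas for pvDecodeA
theorem pvD_nil : pvDecodeA [] = [] := by rw [pvDecodeA.eq_def]

theorem pvD_plain (c : Char) (r : List Char) (h : c ≠ '\\') :
    pvDecodeA (c :: r) = c :: pvDecodeA r := by
  rw [pvDecodeA.eq_def]; simp [h]

theorem pvD_bs_nil : pvDecodeA ['\\'] = ['\\'] := by rw [pvDecodeA.eq_def]; simp

theorem pvD_n (r : List Char) : pvDecodeA ('\\' :: 'n' :: r) = '\n' :: pvDecodeA r := by
  rw [pvDecodeA.eq_def]; simp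
theorem pvD_t (r : List Char) : pvDecodeA ('\\' :: 't' :: r) = '\t' :: pvDecodeA r := by
  rw [pvDecodeA.eq_def]; simp
theorem pvD_r (r : List Char) : pvDecodeA ('\\' :: 'r' :: r) = '\r' :: pvDecodeA r := by
  rw [pvDecodeA.eq_def]; simp
theorem pvD_0 (r : List Char) : pvDecodeA ('\\' :: '0' :: r) = Char.ofNat 0 :: pvDecodeA r := by
  rw [pvDecodeA.eq_def]; simp

theorem pvD_trip (e : Char) (r : List Char) (h : e = '\\' ∨ e = '"' ∨ e = '\'') :
    pvDecodeA ('\\' :: e :: r) = e :: pvDecodeA r := by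
  rcases h with h|h|h <;> subst h <;> (rw [pvDecodeA.eq_def]; simp)

theorem pvD_other (e : Char) (r : List Char) (h1 : e ≠ 'n') (h2 : e ≠ 't') (h3 : e ≠ 'r')
    (h4 : e ≠ '0') (h5 : ¬ (e = '\\' ∨ e = '"' ∨ e = '\'')) (h6 : e ≠ 'x') :
    pvDecodeA ('\\' :: e :: r) = e :: pvDecodeA r := by
  rw [pvDecodeA.eq_def]; simp [h1, h2, h3, h4, h5, h6]

theorem pvD_x_nil : pvDecodeA ['\\', 'x'] = [Char.ofNat 0] := by
  rw [pvDecodeA.eq_def]; simp [pvD_nil]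

theorem pvD_x0 (d1 : Char) (r : List Char) (h : ¬ pvIsHex d1) :
    pvDecodeA ('\\' :: 'x' :: d1 :: r) = Char.ofNat 0 :: pvDecodeA (d1 :: r) := by
  rw [pvDecodeA.eq_def]; simp [h]

theorem pvD_x1_nil (d1 : Char) (h : pvIsHex d1) :
    pvDecodeA ['\\', 'x', d1] = [Char.ofNat (pvHexVal d1)] := by
  rw [pvDecodeA.eq_def]; simp [h, pvD_nil]

theorem pvD_x1 (d1 d2 : Char) (r : List Char) (h1 : pvIsHex d1) (h2 : ¬ pvIsHex d2) :
    pvDecodeA ('\\' :: 'x' :: d1 :: d2 :: r) = Char.ofNat (pvHexVal d1) :: pvDecodeA (d2 :: r) := by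
  rw [pvDecodeA.eq_def]; simp [h1, h2]

theorem pvD_x2 (d1 d2 : Char) (r : List Char) (h1 : pvIsHex d1) (h2 : pvIsHex d2) :
    pvDecodeA ('\\' :: 'x' :: d1 :: d2 :: r) =
      Char.ofNat (16 * pvHexVal d1 + pvHexVal d2) :: pvDecodeA r := by
  rw [pvDecodeA.eq_def]; simp [h1, h2]

-- step lemmas for pvScanA
theorem pvS_nil : pvScanA [] = [] := by rw [pvScanA.eq_def]

theorem pvS_skip (c : Char) (r : List Char) (h : c ≠ '"') : pvScanA (c :: r) = pvScanA r := by
  rw [pvScanA.eq_def]; simp [h]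

theorem pvS_quote (r : List Char) :
    pvScanA ('"' :: r) = pvDecodeA (pvTakeLit r).1 ++ pvScanA (pvTakeLit r).2 := by
  rw [pvScanA.eq_def]; simp

theorem pv_main_proved (n : Nat) : ∀ l : List Char, l.length ≤ n →
    pvScanA l = pvFusedB false l ∧
    pvDecodeA (pvTakeLit l).1 ++ pvFusedB false (pvTakeLit l).2 = pvFusedB true l := by
  induction n with
  | zero =>
    intro l hl
    have hnil : l = [] := by cases l <;> simp_all
    subst hnil
    exact ⟨by simp [pvS_nil, pvF_nil], by simp [pvTakeLit, pvD_nil, pvF_nil]⟩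
  | succ n ih =>
    intro l hl
    cases l with
    | nil => exact ⟨by simp [pvS_nil, pvF_nil], by simp [pvTakeLit, pvD_nil, pvF_nil]⟩
    | cons c rest =>
      have hr : rest.length ≤ n := by simp at hl; omega
      constructor
      · -- scan state
        by_cases hc : c = '"'
        · subst hc
          have h2 := (ih rest hr).2
          have h1 := (ih (pvTakeLit rest).2
            (le_trans (pvTakeLit_snd_length rest) hr)).1
          rw [pvS_quote, pvF_false, h1, h2]; simp
        · rw [pvS_skip c rest hc, pvF_false]
          simp [hc, (ih rest hr).1]
      · -- in-string state
        by_cases hc : c = '"'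
        · subst hc
          rw [pvTakeLit_quote, pvF_quote]
          simp [pvD_nil]
        · by_cases hb : c = '\\'
          · subst hb
            cases rest with
            | nil => simp [pvTakeLit, pvD_bs_nil, pvF_bs_nil, pvF_nil]
            | cons e rest2 =>
              have hr2 : rest2.length ≤ n := by simp at hl; omega
              have T2 := (ih rest2 hr2).2
              rw [pvTakeLit_esc]
              by_cases hen : e = 'n'
              · subst hen; rw [pvD_n, pvF_n]; simp [T2]
              · by_cases het : e = 't'
                · subst het; rw [pvD_t, pvF_t]; simp [T2]
                · by_cases her : e = 'r'
                  · subst her; rw [pvD_r, pvF_r]; simp [T2]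
                  · by_cases he0 : e = '0'
                    · subst he0; rw [pvD_0, pvF_0]; simp [T2]
                    · by_cases hetrip : e = '\\' ∨ e = '"' ∨ e = '\''
                      · have hex : e ≠ 'x' := by rcases hetrip with h|h|h <;> subst h <;> decide
                        rw [pvD_trip e _ hetrip, pvF_other e _ hen het her he0 hex]
                        simp [T2]
                      · by_cases hxx : e = 'x'
                        · subst hxx
                          -- the \x branch: scan up to 2 hex digits, in lockstep
                          cases rest2 with
                          | nil => simp [pvTakeLit, pvD_x_nil, pvF_x_nil, pvF_nil]
                          | cons d1 rest3 =>
                            have hr3 : rest3.length ≤ n := by simp at hl; omega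
                            by_cases hq1 : d1 = '"'
                            · subst hq1
                              rw [pvTakeLit_quote]
                              have : ¬ pvIsHex '"' := by decide
                              rw [pvF_x0 _ _ this, pvF_quote]
                              simp [pvD_x_nil]
                            · by_cases hh1 : pvIsHex d1
                              · have hb1 : d1 ≠ '\\' := by intro h; subst h; simp [pvIsHex] at hh1
                                rw [pvTakeLit_other d1 rest3 hq1 hb1]
                                cases rest3 with
                                | nil =>
                                  simp only [pvTakeLit]
                                  rw [show ('\\' :: 'x' :: d1 :: ([] : List Char)) = ['\\', 'x', d1] from rfl,
                                    pvD_x1_nil d1 hh1, pvF_x1_nil d1 hh1]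
                                  simp [pvF_nil]
                                | cons d2 rest4 =>
                                  have hr4 : rest4.length ≤ n := by simp at hl; omega
                                  by_cases hq2 : d2 = '"'
                                  · subst hq2
                                    rw [pvTakeLit_quote]
                                    have h2 : ¬ pvIsHex '"' := by decide
                                    rw [pvF_x1 d1 '"' rest4 hh1 h2, pvF_quote]
                                    rw [show ('\\' :: 'x' :: d1 :: ([] : List Char)) = ['\\', 'x', d1] from rfl,
                                      pvD_x1_nil d1 hh1]
                                    simp
                                  · by_cases hh2 : pvIsHex d2
                                    · have hb2 : d2 ≠ '\\' := by intro h; subst h; simp [pvIsHex] at hh2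
                                      rw [pvTakeLit_other d2 rest4 hq2 hb2]
                                      rw [pvD_x2 d1 d2 _ hh1 hh2, pvF_x2 d1 d2 _ hh1 hh2]
                                      simp [(ih rest4 hr4).2]
                                    · obtain ⟨t, ht⟩ := pvTakeLit_head d2 rest4 hq2
                                      have T3 := (ih (d2 :: rest4) (by simp at hl ⊢; omega)).2
                                      rw [ht, pvD_x1 d1 d2 t hh1 hh2, pvF_x1 d1 d2 rest4 hh1 hh2]
                                      rw [ht] at T3
                                      simp [T3]
                              · obtain ⟨t, ht⟩ := pvTakeLit_head d1 rest3 hq1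
                                have T3 := (ih (d1 :: rest3) hr2).2
                                rw [ht, pvD_x0 d1 t hh1, pvF_x0 d1 rest3 hh1]
                                rw [ht] at T3
                                simp [T3]
                        · rw [pvD_other e _ hen het her he0 hetrip hxx,
                            pvF_other e _ hen het her he0 hxx]
                          simp [T2]
          · -- plain character inside the string
            rw [pvTakeLit_other c rest hc hb, pvD_plain c _ hb, pvF_plain c rest hc hb]
            simp [(ih rest hr).2]

-- ===== VERDICT (by name: the statement is the Claim_ definition above) =====
theorem concat_c_string_literals_py_spec : Claim_equal_concat_c_string_literals_py := by
  intro expr _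
  unfold Spec_concat_c_string_literals_py concat_c_string_literals_py concat_c_string_literals_py_alt
  exact congrArg String.ofList ((pv_main_proved expr.toList.length expr.toList le_rfl).1)
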